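-- pv_equiv track=rewrite | github.com/ahmedsaid352/CodeWars | Likes VS Dislikes/Likes_VS_Dislike.py | like_or_dislike
-- ===== SOURCE A (Python) =====
-- def like_or_dislike(lst):
--     Like,Dislike = 0,0
--     for el in lst:
--         if el == 'Like':
--             if Like == 0:
--                 Like = 1
--                 Dislike = 0
--             elif Like == 1:
--                 Like,Dislike = 0,0
--         elif el == 'Dislike':
--             if Dislike == 0:
--                 Dislike = 1
--                 Like = 0
--             elif Dislike == 1:
--                 Like,Dislike = 0,0
--         elif el == 'Nothing':
--             Dislike,Like = 0,0
--     if Like == 1: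
--         return 'Like'
--     elif Dislike == 1 :
--         return 'Dislike'
--     else:
--         return 'Nothing'
-- ===== SOURCE B (Python) =====
-- def like_or_dislike(lst):
--     # Backward scan: the final state is decided solely by the trailing run of the
--     # last meaningful token ('Nothing' -> 'Nothing'; a run of r equal Like/Dislike
--     # tokens yields that token iff r is odd). Early exit, no state machine.
--     t = None
--     r = 0
--     for x in reversed(lst):
--         if x not in ('Like', 'Dislike', 'Nothing'):
--             continue
--         if t is None:
--             if x == 'Nothing':
--                 return 'Nothing'
--             t = x
--             r = 1
--         elif x == t:
--             r += 1
--         else: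
--             break
--     if t is None:
--         return 'Nothing'
--     return t if r % 2 == 1 else 'Nothing'
-- ===== Notes on version B (the rewrite author's own statement) =====
-- stated objective: alternative
-- what changed: Replaced A's forward two-flag state machine with a backward scan that finds the last meaningful token and returns it iff its trailing run has odd length (early exit at the first different meaningful token), using the fact that a run of r equal Like/Dislike tokens always lands on that token iff r is odd.
import Mathlib
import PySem

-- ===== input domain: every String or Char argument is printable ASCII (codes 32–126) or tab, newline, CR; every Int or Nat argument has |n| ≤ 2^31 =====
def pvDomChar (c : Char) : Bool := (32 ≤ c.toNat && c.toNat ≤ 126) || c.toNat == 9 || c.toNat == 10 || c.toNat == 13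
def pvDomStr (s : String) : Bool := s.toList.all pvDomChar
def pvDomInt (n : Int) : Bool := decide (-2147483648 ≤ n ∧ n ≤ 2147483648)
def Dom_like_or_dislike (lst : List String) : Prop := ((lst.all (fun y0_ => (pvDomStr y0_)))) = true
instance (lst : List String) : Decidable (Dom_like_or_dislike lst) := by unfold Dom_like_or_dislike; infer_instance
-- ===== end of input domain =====

-- B replaces A's forward two-flag state machine by a backward early-exit scan: the result is
-- the last meaningful token's trailing-run parity (objective: alternative).


-- ===== PORT A =====
-- one iteration of A's loop body on the (Like, Dislike) flag pair
def pvStepA (s : Int × Int) (el : String) : Int × Int :=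
  if el = "Like" then
    (if s.1 = 0 then (1, 0)
     else if s.1 = 1 then (0, 0)
     else s)
  else if el = "Dislike" then
    (if s.2 = 0 then (0, 1)
     else if s.2 = 1 then (0, 0)
     else s)
  else if el = "Nothing" then (0, 0)
  else s

def like_or_dislike (lst : List String) : String :=
  let p := lst.foldl pvStepA (0, 0)
  if p.1 = 1 then "Like"
  else if p.2 = 1 then "Dislike"
  else "Nothing"

-- ===== PORT B =====
-- x in ('Like', 'Dislike', 'Nothing')
def pvMeaningful (x : String) : Bool :=
  x = "Like" || x = "Dislike" || x = "Nothing"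

-- the loop AFTER the first meaningful token t was seen (t ≠ 'Nothing'): count the run, break
-- on a different meaningful token, then 'return t if r % 2 == 1 else Nothing'
def pvRun (t : String) (r : Int) : List String → String
  | [] => if r % 2 = 1 then t else "Nothing"
  | x :: rest =>
      if ¬ pvMeaningful x then pvRun t r rest
      else if x = t then pvRun t (r + 1) rest
      else if r % 2 = 1 then t else "Nothing"

-- the loop BEFORE any meaningful token was seen (t is None)
def pvScan : List String → String
  | [] => "Nothing"
  | x :: rest =>
      if ¬ pvMeaningful x then pvScan rest
      else if x = "Nothing" then "Nothing"
      else pvRun x 1 rest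

def like_or_dislike_alt (lst : List String) : String :=
  pvScan lst.reverse

-- ===== PRECONDITION & SPEC =====
def Spec_like_or_dislike (lst : List String) (out : String) : Prop := out = like_or_dislike_alt lst
instance (lst : List String) (out : String) : Decidable (Spec_like_or_dislike lst out) := by unfold Spec_like_or_dislike; infer_instance

-- ===== CLAIM (what is proved, stated in full; the proofs are below) =====
def Claim_equal_like_or_dislike : Prop := ∀ (lst : List String), Dom_like_or_dislike lst → Spec_like_or_dislike lst (like_or_dislike lst)

-- ===== LEMMAS AND PROOFS =====

-- A's result as a function of the list
def pvS (lst : List String) : String :=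
  let p := lst.foldl pvStepA (0, 0)
  if p.1 = 1 then "Like" else if p.2 = 1 then "Dislike" else "Nothing"

-- A's whole run, at the level of the three result strings
def pvStepS (s : String) (x : String) : String :=
  if x = "Like" then (if s = "Like" then "Nothing" else "Like")
  else if x = "Dislike" then (if s = "Dislike" then "Nothing" else "Dislike")
  else if x = "Nothing" then "Nothing"
  else s

lemma pvReach (lst : List String) :
    lst.foldl pvStepA (0, 0) = (0, 0) ∨ lst.foldl pvStepA (0, 0) = (1, 0) ∨
      lst.foldl pvStepA (0, 0) = (0, 1) := by
  induction lst using List.reverseRecOn with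
  | nil => exact Or.inl rfl
  | append_singleton ys x ih =>
      rw [List.foldl_append]
      rcases ih with h | h | h <;> rw [h] <;>
        by_cases h1 : x = "Like" <;> by_cases h2 : x = "Dislike" <;> by_cases h3 : x = "Nothing" <;>
          simp [pvStepA, h1, h2, h3]

lemma pvS_append (ys : List String) (x : String) :
    pvS (ys ++ [x]) = pvStepS (pvS ys) x := by
  unfold pvS
  rw [List.foldl_append]
  rcases pvReach ys with h | h | h <;> rw [h] <;>
    by_cases h1 : x = "Like" <;> by_cases h2 : x = "Dislike" <;> by_cases h3 : x = "Nothing" <;>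
      simp [pvStepA, pvStepS, h1, h2, h3]

-- pvRun t r l computes: toggle t applied (r + trailing-run) times starting from pvS l.reverse
lemma pvRun_eq (t : String) (ht : t = "Like" ∨ t = "Dislike") :
    ∀ (l : List String) (r : Int),
      pvRun t r l = (if pvS l.reverse = t
        then (if r % 2 = 1 then "Nothing" else t)
        else (if r % 2 = 1 then t else "Nothing")) := by
  have hNt : ("Nothing" : String) ≠ t := by rcases ht with h | h <;> simp [h]
  intro l
  induction l with
  | nil =>
      intro r
      have hS : pvS ([] : List String).reverse = "Nothing" := by simp [pvS]
      rw [hS]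
      simp [pvRun, hNt]
  | cons x l ih =>
      intro r
      have hrev : (x :: l).reverse = l.reverse ++ [x] := by simp
      rw [hrev, pvS_append, pvRun]
      by_cases hm : pvMeaningful x = true
      · by_cases hxt : x = t
        · subst hxt
          have hstep : pvStepS (pvS l.reverse) x = (if pvS l.reverse = x then "Nothing" else x) := by
            rcases ht with h | h <;> simp [pvStepS, h]
          rw [hstep, ih (r + 1)]
          have hpar : ((r + 1) % 2 = 1) ↔ ¬ (r % 2 = 1) := by omega
          by_cases hs : pvS l.reverse = x <;> by_cases hr : r % 2 = 1 <;>
            simp only [hs, hr, hpar, not_true_eq_false, not_false_eq_true, if_true, if_false] <;> simp [hNt, hm]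
        · have hne : pvStepS (pvS l.reverse) x ≠ t := by
            have hm3 : (x = "Like" ∨ x = "Dislike") ∨ x = "Nothing" := by
              simpa [pvMeaningful] using hm
            rcases hm3 with (h | h) | h <;> subst h <;>
              rcases ht with h' | h' <;> subst h' <;>
              simp_all [pvStepS] <;> split_ifs <;> simp_all
          simp [hm, hxt, hne]
      · obtain ⟨⟨h1, h2⟩, h3⟩ : (¬ x = "Like" ∧ ¬ x = "Dislike") ∧ ¬ x = "Nothing" := by
          simpa [pvMeaningful, not_or] using hm
        have : pvStepS (pvS l.reverse) x = pvS l.reverse := by simp [pvStepS, h1, h2, h3]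
        rw [this]
        simpa [hm] using ih r

lemma pvScan_eq (l : List String) : pvScan l = pvS l.reverse := by
  induction l with
  | nil => simp [pvScan, pvS]
  | cons x l ih =>
      have hrev : (x :: l).reverse = l.reverse ++ [x] := by simp
      rw [hrev, pvS_append, pvScan]
      by_cases hm : pvMeaningful x = true
      · have hm3 : (x = "Like" ∨ x = "Dislike") ∨ x = "Nothing" := by
          simpa [pvMeaningful] using hm
        by_cases hN : x = "Nothing"
        · subst hN; simp [pvMeaningful, pvStepS]
        · have hx : x = "Like" ∨ x = "Dislike" := by tauto
          rw [pvRun_eq x hx l 1]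
          have hstep : pvStepS (pvS l.reverse) x = (if pvS l.reverse = x then "Nothing" else x) := by
            rcases hx with h | h <;> simp [pvStepS, h]
          simp [hm, hN, hstep]
      · obtain ⟨⟨h1, h2⟩, h3⟩ : (¬ x = "Like" ∧ ¬ x = "Dislike") ∧ ¬ x = "Nothing" := by
          simpa [pvMeaningful, not_or] using hm
        simp [hm, pvStepS, h1, h2, h3, ih]

-- ===== VERDICT (by name: the statement is the Claim_ definition above) =====
theorem like_or_dislike_spec : Claim_equal_like_or_dislike := by
  intro lst _
  show like_or_dislike lst = like_or_dislike_alt lst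
  rw [like_or_dislike_alt, pvScan_eq, List.reverse_reverse]
  rfl
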